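-- pv_equiv track=rewrite | github.com/danielhstahl/2024-aoc | day7.py | get_all_answers
-- ===== SOURCE A (Python) =====
-- from typing import List, Tuple
-- from itertools import product
--
-- def _local_sum(a: int, b: int) -> int:
--     return a + b
--
-- def _local_mult(a: int, b: int) -> int:
--     return a * b
--
-- def get_all_permutations_of_mult_and_add(n: int):
--     return product([_local_sum, _local_mult], repeat=n)  # this should be a generator
--
-- def can_equal_answer(
--     equation: Tuple[int, List[int]],
--     permutation_generator=get_all_permutations_of_mult_and_add,
-- ) -> bool:
--     answer, values = equation
--     for permutation in permutation_generator(len(values) - 1):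
--         possible_answer = values[0]
--         for index, v in enumerate(values[1:]):
--             possible_answer = permutation[index](possible_answer, v)
--         if answer == possible_answer:
--             return True
--
--     return False
--
-- def get_all_answers(
--     equations: List[Tuple[int, List[int]]],
--     permutation_generator=get_all_permutations_of_mult_and_add,
-- ) -> int:
--     return sum(
--         equation[0]
--         for equation in equations
--         if can_equal_answer(equation, permutation_generator)
--     )
-- ===== SOURCE B (Python) =====
-- def _reachable(target, rev):
--     # rev is the value list reversed (nonempty): work backwards from the target,
--     # undoing the last operation (subtract for '+', exact divide for '*').
--     if len(rev) == 1:
--         return target == rev[0]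
--     last, rest = rev[0], rev[1:]
--     if _reachable(target - last, rest):
--         return True
--     if last == 0:
--         # multiplying by 0 gives 0 whatever the prefix evaluates to
--         return target == 0
--     return target % last == 0 and _reachable(target // last, rest)
--
-- def get_all_answers(equations, permutation_generator=None):
--     # permutation_generator is unused: B does not enumerate operator tuples
--     total = 0
--     for target, values in equations:
--         if _reachable(target, values[::-1]):
--             total += target
--     return total
-- ===== Notes on version B (the rewrite author's own statement) =====
-- stated objective: faster
-- what changed: A enumerates all 2^(n-1) operator tuples per equation and folds each; B recurses backwards from the target over the reversed value list, undoing '+' by subtraction and '*' by exact division (pruning whenever the division is inexact), so no operator enumeration remains.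
-- outside the precondition, e.g. on get_all_answers([(5, [])]): A raises ValueError, B raises IndexError
import Mathlib
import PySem

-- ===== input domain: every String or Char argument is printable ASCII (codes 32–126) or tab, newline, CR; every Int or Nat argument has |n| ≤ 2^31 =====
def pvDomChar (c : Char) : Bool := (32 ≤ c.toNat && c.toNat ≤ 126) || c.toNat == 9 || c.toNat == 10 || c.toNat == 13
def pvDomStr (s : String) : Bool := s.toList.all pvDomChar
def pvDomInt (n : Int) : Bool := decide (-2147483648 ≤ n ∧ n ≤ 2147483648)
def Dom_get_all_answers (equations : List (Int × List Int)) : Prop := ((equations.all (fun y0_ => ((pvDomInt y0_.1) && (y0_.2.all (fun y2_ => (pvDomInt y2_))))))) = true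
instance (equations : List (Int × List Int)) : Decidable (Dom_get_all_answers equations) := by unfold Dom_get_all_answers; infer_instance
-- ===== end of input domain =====

-- B replaces A's O(2^n)-per-equation enumeration of all +/× operator tuples by a backward
-- recursion from the target (undo '+' by subtracting, '×' by exact division): objective faster.

-- ===== PORT A =====
-- product([_local_sum, _local_mult], repeat=n): false = _local_sum, true = _local_mult.
-- (itertools.product's enumeration order is irrelevant here: the result only feeds an `any`.)
def pvAllPerms : Nat → List (List Bool)
  | 0 => [[]]
  | n + 1 => [false, true].flatMap (fun b => (pvAllPerms n).map (fun seq => b :: seq))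

-- the inner loop: possible_answer = permutation[index](possible_answer, v) over values[1:]
def pvFoldOps : Int → List Int → List Bool → Int
  | acc, v :: vs, b :: bs => pvFoldOps (if b then acc * v else acc + v) vs bs
  | acc, _, _ => acc

-- can_equal_answer; on values = [] Python raises ValueError (product repeat=-1): excluded by Pre_
def pvCanEqual (answer : Int) (values : List Int) : Bool :=
  match values with
  | [] => false
  | v :: rest => (pvAllPerms rest.length).any (fun perm => answer == pvFoldOps v rest perm)

def get_all_answers (equations : List (Int × List Int)) : Int :=
  (equations.filter (fun e => pvCanEqual e.1 e.2)).foldl (fun s e => s + e.1) 0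

-- ===== PORT B =====
-- _reachable(target, rev): rev is the value list reversed; undo the last op of a +/× chain
def pvReach : Int → List Int → Bool
  | _, [] => false
  | t, x :: rest =>
    if rest.isEmpty then t == x
    else
      pvReach (t - x) rest ||
        (if x == 0 then t == 0
         else PySem.Int.mod t x == 0 && pvReach (PySem.Int.floordiv t x) rest)

def get_all_answers_alt (equations : List (Int × List Int)) : Int :=
  equations.foldl (fun total e => if pvReach e.1 e.2.reverse then total + e.1 else total) 0

-- ===== PRECONDITION & SPEC =====
-- Pre_ excludes equations whose value list is empty: there A raises ValueError
-- (itertools.product with repeat=-1) and B raises IndexError.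
def Pre_get_all_answers (equations : List (Int × List Int)) : Prop :=
  ∀ e ∈ equations, e.2 ≠ []
instance (equations : List (Int × List Int)) : Decidable (Pre_get_all_answers equations) := by unfold Pre_get_all_answers; infer_instance
def pvWitness_get_all_answers : (List (Int × List Int)) := [(9, [2, 3, 3]), (5, [1, 2])]

def Spec_get_all_answers (equations : List (Int × List Int)) (out : Int) : Prop := out = get_all_answers_alt equations
instance (equations : List (Int × List Int)) (out : Int) : Decidable (Spec_get_all_answers equations out) := by unfold Spec_get_all_answers; infer_instance

-- ===== CLAIM (what is proved, stated in full; the proofs are below) =====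
def Claim_equal_get_all_answers : Prop := ∀ (equations : List (Int × List Int)), Dom_get_all_answers equations → Pre_get_all_answers equations → Spec_get_all_answers equations (get_all_answers equations)

-- ===== LEMMAS AND PROOFS =====

-- reference semantics: Ffun acc vs t = "t is a fold value of some +/× chain over acc, vs"
def Ffun (acc : Int) : List Int → Int → Bool
  | [], t => t == acc
  | r :: rs, t => Ffun (acc + r) rs t || Ffun (acc * r) rs t

theorem anyPerms_eq_Ffun (rs : List Int) : ∀ (acc t : Int),
    ((pvAllPerms rs.length).any (fun perm => t == pvFoldOps acc rs perm)) = Ffun acc rs t := by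
  induction rs with
  | nil => intro acc t; simp [pvAllPerms, pvFoldOps, Ffun]
  | cons r rs ih =>
    intro acc t
    simp only [List.length_cons, pvAllPerms, List.any_flatMap, List.any_map,
      List.any_cons, List.any_nil, Function.comp_def, Ffun, Bool.or_false]
    simp only [pvFoldOps, Bool.false_eq_true, if_false, if_true]
    rw [ih (acc + r) t, ih (acc * r) t]

-- undoing the last element: base case over the multiplication branch
theorem eq_mul_iff_divstep (acc t x : Int) :
    (t == acc * x) =
      (if x == 0 then t == 0
       else PySem.Int.mod t x == 0 && (PySem.Int.floordiv t x == acc)) := by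
  by_cases hx : x = 0
  · simp [hx]
  · have hxb : (x == 0) = false := by simpa using hx
    have key : t = acc * x ↔ (PySem.Int.mod t x = 0 ∧ PySem.Int.floordiv t x = acc) := by
      constructor
      · rintro rfl
        refine ⟨(PySem.Int.mod_eq_zero_iff_dvd _ _).2 ⟨acc, mul_comm acc x⟩, ?_⟩
        simpa [PySem.Int.floordiv] using Int.mul_fdiv_cancel acc hx
      · rintro ⟨hm, hd⟩
        obtain ⟨c, hc⟩ := (PySem.Int.mod_eq_zero_iff_dvd t x).1 hm
        have hfc : PySem.Int.floordiv t x = c := by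
          simpa [PySem.Int.floordiv, hc, mul_comm] using Int.mul_fdiv_cancel c hx
        rw [hfc] at hd; rw [hc, ← hd]; ring
    simp only [hxb, Bool.false_eq_true, if_false]
    rw [Bool.eq_iff_iff]
    simp [beq_iff_eq, key]

-- peeling the last element of the value list off Ffun
theorem Ffun_append (ys : List Int) : ∀ (acc t x : Int),
    Ffun acc (ys ++ [x]) t =
      (Ffun acc ys (t - x) ||
        (if x == 0 then t == 0
         else PySem.Int.mod t x == 0 && Ffun acc ys (PySem.Int.floordiv t x))) := by
  induction ys with
  | nil =>
    intro acc t x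
    simp only [List.nil_append, Ffun]
    rw [eq_mul_iff_divstep acc t x]
    congr 1
    rw [Bool.eq_iff_iff]; simp only [beq_iff_eq]; omega
  | cons y ys ih =>
    intro acc t x
    simp only [List.cons_append, Ffun, ih]
    by_cases hx : x = 0
    · simp only [hx, beq_self_eq_true, if_true]
      generalize Ffun (acc + y) ys (t - 0) = A
      generalize Ffun (acc * y) ys (t - 0) = B
      generalize (t == (0 : Int)) = C
      cases A <;> cases B <;> cases C <;> rfl
    · have hxb : (x == (0 : Int)) = false := by simpa using hx
      simp only [hxb, Bool.false_eq_true, if_false]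
      generalize Ffun (acc + y) ys (t - x) = A
      generalize Ffun (acc * y) ys (t - x) = B
      generalize (PySem.Int.mod t x == 0) = D
      generalize Ffun (acc + y) ys (PySem.Int.floordiv t x) = E1
      generalize Ffun (acc * y) ys (PySem.Int.floordiv t x) = E2
      cases A <;> cases B <;> cases D <;> cases E1 <;> cases E2 <;> rfl

-- B's backward recursion computes Ffun of the reversed list
theorem pvReach_append (ys : List Int) : ∀ (v t : Int),
    pvReach t (ys ++ [v]) = Ffun v ys.reverse t := by
  induction ys with
  | nil => intro v t; simp [pvReach, Ffun]
  | cons x ys ih =>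
    intro v t
    have hne : (ys ++ [v]).isEmpty = false := by cases ys <;> simp
    simp only [List.cons_append, pvReach, hne, Bool.false_eq_true, if_false,
      List.reverse_cons, Ffun_append, ih]

theorem canEqual_eq_reach (t : Int) (vals : List Int) (h : vals ≠ []) :
    pvCanEqual t vals = pvReach t vals.reverse := by
  cases vals with
  | nil => exact absurd rfl h
  | cons v rest =>
    rw [pvCanEqual, List.reverse_cons, pvReach_append, List.reverse_reverse]
    exact anyPerms_eq_Ffun rest v t

theorem fold_eq (equations : List (Int × List Int)) (hp : ∀ e ∈ equations, e.2 ≠ []) :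
    ∀ (s : Int),
      (equations.filter (fun e => pvCanEqual e.1 e.2)).foldl (fun s e => s + e.1) s =
        equations.foldl (fun total e => if pvReach e.1 e.2.reverse then total + e.1 else total) s := by
  induction equations with
  | nil => intro s; rfl
  | cons e es ih =>
    intro s
    have he : pvCanEqual e.1 e.2 = pvReach e.1 e.2.reverse :=
      canEqual_eq_reach e.1 e.2 (hp e (List.mem_cons_self ..))
    have ih' := ih (fun x hx => hp x (List.mem_cons_of_mem _ hx))
    rw [List.filter_cons, List.foldl_cons, he]
    cases hc : pvReach e.1 e.2.reverse <;> simp only [Bool.false_eq_true, if_false,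
      if_true, List.foldl_cons] <;> exact ih' _

-- ===== VERDICT (by name: the statement is the Claim_ definition above) =====
theorem get_all_answers_spec : Claim_equal_get_all_answers := by
  intro equations _ hpre
  unfold Spec_get_all_answers get_all_answers get_all_answers_alt
  exact fold_eq equations hpre 0
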